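-- pv_equiv track=rewrite | github.com/AlexWalcher/automaticHintGeneration | functionsHintGeneration.py | combine_first_elements
-- ===== SOURCE A (Python) =====
-- def combine_first_elements(my_list):
--   combined_list = []
--   num_tuples = len(my_list)
--   for i in range(0, num_tuples, 10):
--     sub_list = my_list[i:i+10]
--     combined_str = '|'.join([tup[0] for tup in sub_list])
--     combined_list.append(combined_str)
--   return combined_list
-- ===== SOURCE B (Python) =====
-- def combine_first_elements(my_list):
--   firsts = [t[0] for t in my_list]
--   combined_list = []
--   while firsts:
--     combined_list.append('|'.join(firsts[:10]))
--     firsts = firsts[10:]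
--   return combined_list
-- ===== Notes on version B (the rewrite author's own statement) =====
-- stated objective: alternative
-- what changed: B first extracts all first elements in one flat pass, then chunks that flat list with a while loop over list slices, instead of A's single indexed loop that slices the tuple list and extracts first elements inside each chunk.
import Mathlib
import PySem

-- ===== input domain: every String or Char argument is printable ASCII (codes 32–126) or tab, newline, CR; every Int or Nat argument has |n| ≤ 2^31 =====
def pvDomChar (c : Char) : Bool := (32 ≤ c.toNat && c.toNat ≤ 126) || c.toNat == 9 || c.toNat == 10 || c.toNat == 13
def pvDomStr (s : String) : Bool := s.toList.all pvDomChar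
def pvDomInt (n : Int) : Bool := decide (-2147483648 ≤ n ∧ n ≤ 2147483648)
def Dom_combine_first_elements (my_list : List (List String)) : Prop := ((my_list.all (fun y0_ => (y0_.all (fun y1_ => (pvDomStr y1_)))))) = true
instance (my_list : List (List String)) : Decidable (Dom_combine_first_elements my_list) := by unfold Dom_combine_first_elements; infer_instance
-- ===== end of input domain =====

-- B separates the work into two passes: extract all first elements flat, then chunk-and-join
-- that flat list recursively by tens — an alternative decomposition of A's single indexed loop.


-- ===== PORT A =====
-- for i in range(0, len(my_list), 10): append '|'.join([tup[0] for tup in sub_list]).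
-- tup[0] is ported as (pyGet? tup 0).getD ""; Python raises IndexError on an empty tup,
-- exactly the inputs Pre_ excludes.
def combine_first_elements (my_list : List (List String)) : List String :=
  (PySem.List.pyRange 0 my_list.length 10).foldl
    (fun combined_list i =>
      let sub_list := PySem.List.slice my_list (some i) (some (i + 10))
      let combined_str :=
        PySem.Str.join "|" (sub_list.map (fun tup => (PySem.List.pyGet? tup 0).getD ""))
      combined_list ++ [combined_str]) []

-- ===== PORT B =====
-- the 'while firsts:' loop of Source B: peel firsts[:10], continue on firsts[10:]
def pvChunkJoin (l : List String) : List String :=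
  if _h : l = [] then []
  else PySem.Str.join "|" (l.take 10) :: pvChunkJoin (l.drop 10)
termination_by l.length
decreasing_by
  have : 0 < l.length := List.length_pos_iff.mpr _h
  simp [List.length_drop]; omega

def combine_first_elements_alt (my_list : List (List String)) : List String :=
  pvChunkJoin (my_list.map (fun t => (PySem.List.pyGet? t 0).getD ""))

-- ===== PRECONDITION & SPEC =====
-- Pre_ excludes lists containing an empty inner list: there Python A (and B) raise IndexError on tup[0].
def Pre_combine_first_elements (my_list : List (List String)) : Prop :=
  ∀ t ∈ my_list, t ≠ []
instance (my_list : List (List String)) : Decidable (Pre_combine_first_elements my_list) := by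
  unfold Pre_combine_first_elements; infer_instance

def pvWitness_combine_first_elements : List (List String) := [["a"], ["b", "c"]]

def Spec_combine_first_elements (my_list : List (List String)) (out : List String) : Prop := out = combine_first_elements_alt my_list
instance (my_list : List (List String)) (out : List String) : Decidable (Spec_combine_first_elements my_list out) := by unfold Spec_combine_first_elements; infer_instance

-- ===== CLAIM (what is proved, stated in full; the proofs are below) =====
def Claim_equal_combine_first_elements : Prop := ∀ (my_list : List (List String)), Dom_combine_first_elements my_list → Pre_combine_first_elements my_list → Spec_combine_first_elements my_list (combine_first_elements my_list)

-- ===== LEMMAS AND PROOFS =====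

theorem pvChunkJoin_nil : pvChunkJoin [] = [] := by
  rw [pvChunkJoin]; simp

theorem pvChunkJoin_cons (l : List String) (h : l ≠ []) :
    pvChunkJoin l = PySem.Str.join "|" (l.take 10) :: pvChunkJoin (l.drop 10) := by
  rw [pvChunkJoin]; simp [h]

-- chunk at index 10*(k+1) of xs is chunk at index 10*k of xs.drop 10
theorem pv_slice_shift (xs : List (List String)) (k : Nat) :
    PySem.List.slice xs (some ((10 * (k + 1) : Nat) : Int)) (some (((10 * (k + 1) : Nat) : Int) + 10))
      = PySem.List.slice (xs.drop 10) (some ((10 * k : Nat) : Int)) (some (((10 * k : Nat) : Int) + 10)) := by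
  rw [PySem.List.slice_toNat xs (by omega) (by omega),
      PySem.List.slice_toNat (xs.drop 10) (by omega) (by omega), List.drop_drop]
  have e1 : (((10 * (k + 1) : Nat) : Int) + 10).toNat - ((10 * (k + 1) : Nat) : Int).toNat
      = (((10 * k : Nat) : Int) + 10).toNat - ((10 * k : Nat) : Int).toNat := by omega
  have e2 : ((10 * (k + 1) : Nat) : Int).toNat = ((10 * k : Nat) : Int).toNat + 10 := by omega
  rw [e1, e2, Nat.add_comm ((10 * k : Nat) : Int).toNat 10]

-- the loop of A, peeled ten indices (= one chunk) at a time
theorem pv_aux (m : Nat) : ∀ (xs : List (List String)) (acc : List String),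
    xs.length ≤ 10 * m → 10 * m < xs.length + 10 →
    ((List.range m).map (fun k => ((10 * k : Nat) : Int))).foldl
      (fun combined_list i => combined_list ++ [PySem.Str.join "|" ((PySem.List.slice xs (some i) (some (i + 10))).map (fun tup => (PySem.List.pyGet? tup 0).getD ""))]) acc
      = acc ++ pvChunkJoin (xs.map (fun t => (PySem.List.pyGet? t 0).getD "")) := by
  induction m with
  | zero =>
    intro xs acc h1 _
    have hx : xs = [] := List.eq_nil_of_length_eq_zero (by omega)
    subst hx
    simp [pvChunkJoin_nil]
  | succ m ih =>
    intro xs acc h1 h2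
    have hlen : 0 < xs.length := by omega
    have hmapne : xs.map (fun t => (PySem.List.pyGet? t 0).getD "") ≠ [] := by
      simp [List.length_pos_iff.mp hlen]
    rw [List.range_succ_eq_map]
    simp only [List.map_cons, List.map_map, Function.comp_def, Nat.succ_eq_add_one,
      List.foldl_cons]
    have hslice0 : PySem.List.slice xs (some ((10 * 0 : Nat) : Int)) (some (((10 * 0 : Nat) : Int) + 10))
        = xs.take 10 := by
      rw [PySem.List.slice_toNat xs (by omega) (by omega)]
      simp
    rw [pvChunkJoin_cons _ hmapne]
    rw [List.foldl_map]
    rw [PySem.List.foldl_congr_mem (List.range m)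
      (fun combined_list k => combined_list ++ [PySem.Str.join "|" ((PySem.List.slice xs (some ((10 * (k + 1) : Nat) : Int)) (some (((10 * (k + 1) : Nat) : Int) + 10))).map (fun tup => (PySem.List.pyGet? tup 0).getD ""))])
      (fun combined_list k => combined_list ++ [PySem.Str.join "|" ((PySem.List.slice (xs.drop 10) (some ((10 * k : Nat) : Int)) (some (((10 * k : Nat) : Int) + 10))).map (fun tup => (PySem.List.pyGet? tup 0).getD ""))])
      _ (fun acc' k _ => by simp only [pv_slice_shift xs k])]
    rw [← List.foldl_map (f := fun k : Nat => ((10 * k : Nat) : Int))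
      (g := fun combined_list i => combined_list ++ [PySem.Str.join "|" ((PySem.List.slice (xs.drop 10) (some i) (some (i + 10))).map (fun tup => (PySem.List.pyGet? tup 0).getD ""))])
      (l := List.range m)]
    rw [ih (xs.drop 10) _ (by simp; omega) (by simp; omega)]
    rw [hslice0, List.map_take, List.map_drop]
    simp

-- ===== VERDICT (by name: the statement is the Claim_ definition above) =====
theorem combine_first_elements_spec : Claim_equal_combine_first_elements := by
  intro my_list _ _
  show combine_first_elements my_list = combine_first_elements_alt my_list
  unfold combine_first_elements combine_first_elements_alt
  show (PySem.List.pyRange 0 my_list.length 10).foldl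
      (fun combined_list i => combined_list ++ [PySem.Str.join "|" ((PySem.List.slice my_list (some i) (some (i + 10))).map (fun tup => (PySem.List.pyGet? tup 0).getD ""))]) []
    = pvChunkJoin (my_list.map (fun t => (PySem.List.pyGet? t 0).getD ""))
  rw [PySem.List.pyRange_of_pos 0 my_list.length (by norm_num)]
  by_cases h : my_list = []
  · subst h; simp [pvChunkJoin_nil]
  · have hn : 0 < my_list.length := List.length_pos_iff.mpr h
    rw [if_pos (by exact_mod_cast hn)]
    set n := my_list.length with hndef
    have hm : (((n : Int) - 0 + 10 - 1) / 10).toNat = (n + 9) / 10 := by omega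
    rw [hm]
    have hmap : List.map (fun k : Nat => (0 : Int) + 10 * (k : Int)) (List.range ((n + 9) / 10))
        = List.map (fun k : Nat => ((10 * k : Nat) : Int)) (List.range ((n + 9) / 10)) :=
      List.map_congr_left (fun k _ => by push_cast; ring)
    rw [hmap]
    exact pv_aux ((n + 9) / 10) my_list [] (by omega) (by omega)
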